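-- pv_equiv track=rewrite | github.com/TheAlgorithms/Python | project_euler/problem_122/sol1.py | solution
-- ===== SOURCE A (Python) =====
-- def solve(nums: list[int], goal: int, depth: int) -> bool:
--     """
--     Checks if nums can have a sum equal to goal, given that length of nums does
--     not exceed depth.
--
--     >>> solve([1], 2, 2)
--     True
--     >>> solve([1], 2, 0)
--     False
--     """
--     if len(nums) > depth:
--         return False
--     for el in nums:
--         if el + nums[-1] == goal:
--             return True
--         nums.append(el + nums[-1])
--         if solve(nums=nums, goal=goal, depth=depth):
--             return True
--         del nums[-1]
--     return False
--
-- def solution(n: int = 200) -> int: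
--     """
--     Calculates sum of smallest number of multiplactions for each number up to
--     and including n.
--
--     >>> solution(1)
--     0
--     >>> solution(2)
--     1
--     >>> solution(14)
--     45
--     >>> solution(15)
--     50
--     """
--     total = 0
--     for i in range(2, n + 1):
--         max_length = 0
--         while True:
--             nums = [1]
--             max_length += 1
--             if solve(nums=nums, goal=i, depth=max_length):
--                 break
--         total += max_length
--     return total
-- ===== SOURCE B (Python) =====
-- def solution(n: int = 200) -> int:
--     """Sum over 2..n of the minimal number of additions in a star chain
--     reaching i, found by breadth-first search over chain frontiers: a frontier
--     chain hits i iff it contains i - c[-1]; extensions reaching i or beyond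
--     are dead (chains only grow) and are pruned."""
--     total = 0
--     for i in range(2, n + 1):
--         frontier = [[1]]
--         length = 1
--         while not any(i - c[-1] in c for c in frontier):
--             frontier = [c + [v] for c in frontier for el in c
--                         if (v := el + c[-1]) < i]
--             length += 1
--         total += length
--     return total
-- ===== Notes on version B (the rewrite author's own statement) =====
-- stated objective: alternative
-- what changed: A's per-number iterative-deepening DFS (mutating one chain in place and re-searching every smaller depth bound) is replaced by a per-number breadth-first search that keeps the whole frontier of star chains, tests each level once via a membership check (i - c[-1] in c) and prunes extensions that reach i or beyond.
import Mathlib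
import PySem

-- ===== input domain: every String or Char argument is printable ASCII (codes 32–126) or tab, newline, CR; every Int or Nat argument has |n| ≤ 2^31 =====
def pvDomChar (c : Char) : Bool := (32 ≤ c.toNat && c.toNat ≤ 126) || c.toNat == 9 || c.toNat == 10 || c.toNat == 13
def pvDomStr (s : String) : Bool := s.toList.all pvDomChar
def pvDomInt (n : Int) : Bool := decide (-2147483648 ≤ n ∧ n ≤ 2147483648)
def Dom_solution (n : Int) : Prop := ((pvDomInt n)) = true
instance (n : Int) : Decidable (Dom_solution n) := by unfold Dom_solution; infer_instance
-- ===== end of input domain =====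

-- B replaces A's per-number iterative-deepening DFS (mutating one chain) by a per-number
-- breadth-first search over pruned frontiers of star chains (alternative decomposition, similar cost).
-- A mutates its local list `nums` in place, but the mutation is invisible to the caller of
-- `solution`; the equivalence is about the return value.


-- ===== PORT A =====
-- `solve` mutates `nums` (append, recurse, delete) but every iteration restores the list, so the
-- port passes the chain functionally; `nums[-1]` is ported as `getLastD 0`, exact because the
-- chain is always nonempty.  The fuel argument only makes the recursion total: `solve` passes
-- exactly (depth + 2 - len).toNat fuel, which the Python control flow never exhausts (the depth
-- guard fires first), so fuel 0 (returning false) is unreachable from `solve`.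
mutual
def solveFuel (f : Nat) (nums : List Int) (goal depth : Int) : Bool :=
  match f with
  | 0 => false
  | f+1 =>
    if (nums.length : Int) > depth then false
    else solveLoop f nums nums goal depth
termination_by (f, 0)
def solveLoop (f : Nat) (nums rest : List Int) (goal depth : Int) : Bool :=
  match rest with
  | [] => false
  | el :: rest' =>
    if el + nums.getLastD 0 == goal then true
    else if solveFuel f (nums ++ [el + nums.getLastD 0]) goal depth then true
    else solveLoop f nums rest' goal depth
termination_by (f, rest.length + 1)
end

def solve (nums : List Int) (goal depth : Int) : Bool :=
  solveFuel (depth + 2 - nums.length).toNat nums goal depth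

-- `while True: max_length += 1; if solve(...): break` — fuel i.toNat bounds the loop; it is
-- never exhausted (the staircase chain 1,2,…,i succeeds at depth i-1, proved below).
def loopA (goal : Int) : Int → Nat → Int
  | m, 0 => m
  | m, f+1 => if solve [1] goal (m + 1) then m + 1 else loopA goal (m + 1) f

def solution (n : Int) : Int :=
  (PySem.List.pyRange 2 (n + 1) 1).foldl (fun total i => total + loopA i 0 i.toNat) 0

-- ===== PORT B =====
-- Source B: per number i, breadth-first search over frontiers of star chains: a chain hits i iff it
-- contains i - c[-1]; extensions that compute v = el + c[-1] ≥ i are pruned (comprehension with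
-- `if`, ported as filter-then-map); `c[-1]` is `getLastD 0` (chains are nonempty); the fuel
-- i.toNat only makes the `while` total and is never exhausted (staircase bound, proved below).
def chkB (goal : Int) (frontier : List (List Int)) : Bool :=
  frontier.any (fun c => c.contains (goal - c.getLastD 0))

def stepB (goal : Int) (frontier : List (List Int)) : List (List Int) :=
  frontier.flatMap (fun c =>
    (c.filter (fun el => el + c.getLastD 0 < goal)).map (fun el => c ++ [el + c.getLastD 0]))

def loopB (goal : Int) : List (List Int) → Int → Nat → Int
  | _, len, 0 => len
  | frontier, len, f+1 =>
    if chkB goal frontier then len else loopB goal (stepB goal frontier) (len + 1) f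

def solution_alt (n : Int) : Int :=
  (PySem.List.pyRange 2 (n + 1) 1).foldl (fun total i => total + loopB i [[1]] 1 i.toNat) 0

-- ===== PRECONDITION & SPEC =====
def Spec_solution (n : Int) (out : Int) : Prop := out = solution_alt n
instance (n : Int) (out : Int) : Decidable (Spec_solution n out) := by unfold Spec_solution; infer_instance

-- ===== CLAIM (what is proved, stated in full; the proofs are below) =====
def Claim_equal_solution : Prop := ∀ (n : Int), Dom_solution n → Spec_solution n (solution n)

-- ===== LEMMAS AND PROOFS =====

-- the UNPRUNED frontier machinery, the common yardstick both loops are measured against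
def chkF (goal : Int) (frontier : List (List Int)) : Bool :=
  frontier.any (fun c => c.any (fun el => el + c.getLastD 0 == goal))

def stepF (frontier : List (List Int)) : List (List Int) :=
  frontier.flatMap (fun c => c.map (fun el => c ++ [el + c.getLastD 0]))

def iterF : Nat → List (List Int) → List (List Int)
  | 0, F => F
  | k+1, F => iterF k (stepF F)

lemma iterF_succ_right (k : Nat) (F : List (List Int)) :
    iterF (k + 1) F = stepF (iterF k F) := by
  induction k generalizing F with
  | zero => rfl
  | succ k ih => exact ih (stepF F)

lemma any_or (l : List Int) (p q : Int → Bool) :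
    l.any (fun x => p x || q x) = (l.any p || l.any q) := by
  induction l with
  | nil => rfl
  | cons a l ih =>
    simp only [List.any_cons, ih]
    cases p a <;> cases q a <;> cases l.any p <;> cases l.any q <;> rfl

lemma any_comm {α β : Type} (l : List α) (m : List β) (p : α → β → Bool) :
    l.any (fun a => m.any (p a)) = m.any (fun b => l.any (fun a => p a b)) := by
  rw [Bool.eq_iff_iff]
  simp only [List.any_eq_true]
  constructor
  · rintro ⟨a, ha, b, hb, h⟩; exact ⟨b, hb, a, ha, h⟩
  · rintro ⟨b, hb, a, ha, h⟩; exact ⟨a, ha, b, hb, h⟩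

-- checking the k-th frontier of F checks each chain's own k-th frontier
lemma chk_iter_any (k : Nat) (goal : Int) : ∀ (F : List (List Int)),
    chkF goal (iterF k F) = F.any (fun c => chkF goal (iterF k [c])) := by
  induction k with
  | zero =>
    intro F
    show chkF goal F = F.any fun c => chkF goal (iterF 0 [c])
    unfold chkF
    exact List.any_congr rfl (fun c => by simp [iterF])
  | succ k ih =>
    intro F
    show chkF goal (iterF k (stepF F)) = _
    rw [ih (stepF F)]
    unfold stepF
    rw [List.any_flatMap]
    refine List.any_congr rfl (fun c => ?_)
    rw [List.any_map,
      show iterF (k+1) [c] = iterF k (stepF [c]) from rfl,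
      show stepF [c] = c.map (fun el => c ++ [el + c.getLastD 0]) by simp [stepF],
      ih (c.map (fun el => c ++ [el + c.getLastD 0])), List.any_map]

lemma solveLoop_any (f : Nat) (nums : List Int) (goal depth : Int) : ∀ rest,
    solveLoop f nums rest goal depth =
      rest.any (fun el => (el + nums.getLastD 0 == goal) ||
        solveFuel f (nums ++ [el + nums.getLastD 0]) goal depth) := by
  intro rest
  induction rest with
  | nil => simp [solveLoop]
  | cons a rest ih =>
    rw [solveLoop, List.any_cons, ← ih]
    cases h1 : (a + nums.getLastD 0 == goal) <;>
      cases h2 : solveFuel f (nums ++ [a + nums.getLastD 0]) goal depth <;>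
        simp

-- characterisation of A's bounded DFS as a scan of the unpruned frontiers
lemma solve_char (f : Nat) : ∀ (c : List Int) (goal depth : Int), c ≠ [] →
    f = (depth + 2 - c.length).toNat →
    solveFuel f c goal depth =
      (List.range (depth + 1 - c.length).toNat).any (fun k => chkF goal (iterF k [c])) := by
  induction f with
  | zero =>
    intro c goal depth _ hf
    rw [show (depth + 1 - (c.length : Int)).toNat = 0 by omega]
    simp [solveFuel]
  | succ f ih =>
    intro c goal depth hc hf
    rw [solveFuel]
    by_cases hlen : ((c.length : Int) > depth)
    · rw [show (depth + 1 - (c.length : Int)).toNat = 0 by omega]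
      simp [hlen]
    · simp only [hlen, if_false]
      rw [solveLoop_any, any_or]
      have hrec : (c.any fun el => solveFuel f (c ++ [el + c.getLastD 0]) goal depth)
          = c.any (fun el => (List.range (depth + 1 - (c.length : Int) - 1).toNat).any
              (fun k => chkF goal (iterF k [c ++ [el + c.getLastD 0]]))) := by
        refine List.any_congr rfl (fun el => ?_)
        rw [ih (c ++ [el + c.getLastD 0]) goal depth (by simp) (by simp; omega)]
        congr 2
        simp
        omega
      rw [hrec]
      rw [show (depth + 1 - (c.length : Int)).toNat
            = (depth + 1 - (c.length : Int) - 1).toNat + 1 by omega,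
        List.range_succ_eq_map, List.any_cons, List.any_map]
      congr 1
      · simp [iterF, chkF]
      · rw [any_comm]
        refine List.any_congr rfl (fun k => ?_)
        show (c.any fun el => chkF goal (iterF k [c ++ [el + c.getLastD 0]]))
            = chkF goal (iterF (Nat.succ k) [c])
        rw [show iterF (Nat.succ k) [c] = iterF k (stepF [c]) from rfl,
          show stepF [c] = c.map (fun el => c ++ [el + c.getLastD 0]) by simp [stepF],
          chk_iter_any k goal, List.any_map]
        exact List.any_congr rfl (fun el => rfl)

lemma solve_one (goal d : Int) :
    solve [1] goal d = (List.range d.toNat).any (fun k => chkF goal (iterF k [[1]])) := by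
  have h := solve_char ((d + 2 - (([1] : List Int).length : Int)).toNat) [1] goal d
    (by simp) rfl
  rw [show ((d + 1 - (([1] : List Int).length : Int)).toNat) = d.toNat by norm_num] at h
  exact h

-- the staircase chain 1, 2, …, j+1
def stair (j : Nat) : List Int := (List.range j).map (fun t => ((t : Int) + 1))

lemma stair_succ (j : Nat) : stair (j + 1) = stair j ++ [(j : Int) + 1] := by
  simp [stair, List.range_succ]

lemma stair_last (j : Nat) : (stair (j + 1)).getLastD 0 = (j : Int) + 1 := by
  rw [stair_succ]; simp

lemma one_mem_stair (j : Nat) : (1 : Int) ∈ stair (j + 1) := by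
  simp [stair]
  exact ⟨0, Nat.zero_le j, by simp⟩

lemma mem_stepF {c : List Int} {F : List (List Int)} {el : Int}
    (hc : c ∈ F) (hel : el ∈ c) : c ++ [el + c.getLastD 0] ∈ stepF F := by
  simp only [stepF, List.mem_flatMap, List.mem_map]
  exact ⟨c, hc, el, hel, rfl⟩

lemma stair_mem_iter (j : Nat) : stair (j + 1) ∈ iterF j [[1]] := by
  induction j with
  | zero => simp [stair, iterF]
  | succ j ih =>
    rw [iterF_succ_right]
    have h := mem_stepF ih (one_mem_stair j)
    rw [stair_last] at h
    have he : stair (j + 1) ++ [1 + ((j : Int) + 1)] = stair (j + 1 + 1) := by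
      rw [stair_succ (j + 1)]
      push_cast
      ring_nf
    rwa [he] at h

lemma C_exists (i : Int) (hi : 2 ≤ i) :
    ∃ k, k ≤ (i - 2).toNat ∧ chkF i (iterF k [[1]]) = true := by
  refine ⟨(i - 2).toNat, le_refl _, ?_⟩
  simp only [chkF, List.any_eq_true]
  refine ⟨stair ((i - 2).toNat + 1), stair_mem_iter _, 1, one_mem_stair _, ?_⟩
  rw [stair_last]
  simp only [beq_iff_eq]
  omega

-- A's while-loop returns K + 1, where K is the first frontier level that hits the goal
lemma loopA_spec (i : Int) (K : Nat) (hK : chkF i (iterF K [[1]]) = true)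
    (hmin : ∀ j < K, chkF i (iterF j [[1]]) = false) :
    ∀ (f m : Nat), K < m + f → (∀ j < m, chkF i (iterF j [[1]]) = false) →
      loopA i (m : Int) f = (K : Int) + 1 := by
  intro f
  induction f with
  | zero => intro m h1 h2; exact absurd hK (by simp [h2 K (by omega)])
  | succ f ih =>
    intro m h1 h2
    rw [loopA]
    have hcond : solve [1] i ((m : Int) + 1)
        = (List.range (m + 1)).any (fun k => chkF i (iterF k [[1]])) := by
      rw [solve_one, show ((m : Int) + 1).toNat = m + 1 by omega]
    by_cases hKm : K ≤ m
    · have hKeq : K = m := by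
        rcases lt_or_eq_of_le hKm with h | h
        · exact absurd hK (by simp [h2 K h])
        · exact h
      have hs : solve [1] i ((m : Int) + 1) = true := by
        rw [hcond]
        simp only [List.any_eq_true]
        exact ⟨K, by simp only [List.mem_range]; omega, hK⟩
      rw [hs]
      simp [hKeq]
    · have hs : solve [1] i ((m : Int) + 1) = false := by
        rw [hcond]
        simp only [List.any_eq_false, List.mem_range]
        intro k hk
        rcases Nat.lt_or_ge k m with h | h
        · intro hc; rw [h2 k h] at hc; cases hc
        · have hkm : k = m := by omega
          subst hkm
          intro hc; rw [hmin k (by omega)] at hc; cases hc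
      rw [hs]
      simp only [Bool.false_eq_true, if_false]
      have h3 := ih (m + 1) (by omega) (by
        intro j hj
        rcases Nat.lt_or_ge j m with h | h
        · exact h2 j h
        · have hjm : j = m := by omega
          subst hjm
          exact hmin j (by omega))
      simpa [Nat.cast_add] using h3

-- ===== pruning: B's pruned frontier agrees with the unpruned yardstick =====

-- the invariant of every chain in a frontier: nonempty, elements ≥ 1 and ≤ the last element
def invC (c : List Int) : Prop :=
  c ≠ [] ∧ ∀ x ∈ c, 1 ≤ x ∧ x ≤ c.getLastD 0

-- B's membership check equals the yardstick check on ANY frontier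
lemma chk_eq (goal : Int) (F : List (List Int)) : chkB goal F = chkF goal F := by
  unfold chkB chkF
  refine List.any_congr rfl (fun c => ?_)
  rw [Bool.eq_iff_iff]
  simp only [List.contains_iff_mem, List.any_eq_true, beq_iff_eq]
  constructor
  · intro h; exact ⟨goal - c.getLastD 0, h, by omega⟩
  · rintro ⟨el, hel, h⟩
    have : el = goal - c.getLastD 0 := by omega
    rwa [this] at hel

-- the pruned step of a filtered frontier is the filtered unpruned step
lemma stepB_filter (i : Int) : ∀ (F : List (List Int)),
    stepB i (F.filter (fun c => c.all (fun x => decide (x < i))))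
      = (stepF F).filter (fun c => c.all (fun x => decide (x < i))) := by
  intro F
  induction F with
  | nil => rfl
  | cons c F ih =>
    rw [show stepF (c :: F) = c.map (fun el => c ++ [el + c.getLastD 0]) ++ stepF F from rfl,
      List.filter_append, ← ih, List.filter_cons]
    by_cases hg : (c.all (fun x => decide (x < i))) = true
    · rw [if_pos hg,
        show stepB i (c :: List.filter (fun c => c.all (fun x => decide (x < i))) F)
          = (c.filter (fun el => el + c.getLastD 0 < i)).map (fun el => c ++ [el + c.getLastD 0])
            ++ stepB i (F.filter (fun c => c.all (fun x => decide (x < i)))) from rfl]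
      congr 1
      rw [List.filter_map]
      congr 1
      refine (List.filter_congr (fun el _ => ?_)).symm
      show ((c ++ [el + c.getLastD 0]).all (fun x => decide (x < i))) = decide (el + c.getLastD 0 < i)
      rw [List.all_append, hg]
      simp
    · rw [if_neg hg]
      have hz : (c.map (fun el => c ++ [el + c.getLastD 0])).filter
          (fun c => c.all (fun x => decide (x < i))) = [] := by
        rw [List.filter_eq_nil_iff]
        intro d hd
        rcases List.mem_map.mp hd with ⟨el, _, rfl⟩
        simp only [List.all_append, Bool.and_eq_true, not_and]
        intro hca
        exact absurd hca (by simpa using hg)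
      rw [hz, List.nil_append]

-- every chain of an unpruned frontier of [[1]] satisfies the invariant
lemma inv_iter : ∀ (k : Nat) (c : List Int), c ∈ iterF k [[1]] → invC c := by
  intro k
  induction k with
  | zero =>
    intro c hc
    rcases List.mem_singleton.mp hc with rfl
    exact ⟨by simp, by intro x hx; rcases List.mem_singleton.mp hx with rfl; simp⟩
  | succ k ih =>
    intro c2 hc2
    rw [iterF_succ_right] at hc2
    simp only [stepF, List.mem_flatMap, List.mem_map] at hc2
    obtain ⟨c, hc, el, hel, rfl⟩ := hc2
    obtain ⟨hne, hall⟩ := ih c hc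
    have hlast : c.getLastD 0 ∈ c := by
      rcases c with _ | ⟨a, c'⟩
      · exact absurd rfl hne
      · rw [List.getLastD_eq_getLast?, List.getLast?_eq_some_getLast (by simp)]
        exact List.getLast_mem _
    have h1el := hall el hel
    have h1last := hall _ hlast
    refine ⟨by simp, ?_⟩
    intro x hx
    rw [List.getLastD_concat]
    rcases List.mem_append.mp hx with h | h
    · have := hall x h
      constructor
      · omega
      · omega
    · rcases List.mem_singleton.mp h with rfl
      omega

-- filtering out chains with an element ≥ i does not change the check
lemma chkF_filter (i : Int) (F : List (List Int)) (hinv : ∀ c ∈ F, invC c) :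
    chkF i (F.filter (fun c => c.all (fun x => decide (x < i)))) = chkF i F := by
  rw [Bool.eq_iff_iff]
  unfold chkF
  simp only [List.any_eq_true, List.mem_filter]
  constructor
  · rintro ⟨c, ⟨hc, _⟩, h⟩; exact ⟨c, hc, h⟩
  · rintro ⟨c, hc, el, hel, heq⟩
    refine ⟨c, ⟨hc, ?_⟩, el, hel, heq⟩
    obtain ⟨_, hall⟩ := hinv c hc
    rw [List.all_eq_true]
    intro x hx
    have hx' := hall x hx
    have he' := hall el hel
    rw [beq_iff_eq] at heq
    simp only [decide_eq_true_eq]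
    omega

-- B's while-loop returns K + 1 as well
lemma loopB_spec (i : Int) (K : Nat) (hK : chkF i (iterF K [[1]]) = true)
    (hmin : ∀ j < K, chkF i (iterF j [[1]]) = false) :
    ∀ (f t : Nat), K < t + f → (∀ j < t, chkF i (iterF j [[1]]) = false) →
      loopB i ((iterF t [[1]]).filter (fun c => c.all (fun x => decide (x < i))))
        ((t : Int) + 1) f = (K : Int) + 1 := by
  intro f
  induction f with
  | zero => intro t h1 h2; exact absurd hK (by simp [h2 K (by omega)])
  | succ f ih =>
    intro t h1 h2
    rw [loopB]
    rw [chk_eq, chkF_filter i _ (inv_iter t)]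
    by_cases hct : chkF i (iterF t [[1]]) = true
    · have hKeq : K = t := by
        rcases Nat.lt_trichotomy K t with h | h | h
        · exact absurd hK (by simp [h2 K h])
        · exact h
        · exact absurd hct (by simp [hmin t h])
      rw [hct]
      simp [hKeq]
    · rw [Bool.not_eq_true] at hct
      rw [hct]
      simp only [Bool.false_eq_true, if_false]
      rw [stepB_filter, ← iterF_succ_right]
      have h3 := ih (t + 1) (by omega) (by
        intro j hj
        rcases Nat.lt_or_ge j t with h | h
        · exact h2 j h
        · have hjt : j = t := by omega
          subst hjt
          exact hct)
      simpa [Nat.cast_add] using h3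

lemma per_i (i : Int) (hi : 2 ≤ i) : loopA i 0 i.toNat = loopB i [[1]] 1 i.toNat := by
  obtain ⟨k0, hk0, hC⟩ := C_exists i hi
  have hex : ∃ k, chkF i (iterF k [[1]]) = true := ⟨k0, hC⟩
  have hKspec := Nat.find_spec hex
  have hKmin : ∀ j < Nat.find hex, chkF i (iterF j [[1]]) = false := by
    intro j hj
    have := Nat.find_min hex hj
    simpa using this
  have hKlt : Nat.find hex < i.toNat := by
    have := Nat.find_min' hex hC
    omega
  have hA := loopA_spec i (Nat.find hex) hKspec hKmin i.toNat 0 (by omega) (by omega)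
  have hB := loopB_spec i (Nat.find hex) hKspec hKmin i.toNat 0 (by omega) (by omega)
  simp only [Nat.cast_zero] at hA hB
  rw [show ((0 : Int) + 1) = 1 by norm_num] at hB
  rw [show (iterF 0 [[1]]).filter (fun c => c.all (fun x => decide (x < i))) = [[1]] by
    show List.filter _ [[1]] = [[1]]
    rw [List.filter_cons_of_pos (by simp; omega)]
    rfl] at hB
  rw [hA, hB]

-- ===== VERDICT (by name: the statement is the Claim_ definition above) =====
theorem solution_spec : Claim_equal_solution := by
  intro n _
  show solution n = solution_alt n
  unfold solution solution_alt
  apply PySem.List.foldl_congr_mem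
  intro acc i hi
  rw [per_i i (by
    have := (PySem.List.mem_pyRange_one).mp hi
    omega)]
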